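-- pv_equiv track=rewrite | github.com/mighty-muffin/insecure-banking | update_imports_v2.py | convert_multi_model_import
-- ===== SOURCE A (Python) =====
-- def convert_multi_model_import(imports_str):
--     """Convert multi-model imports."""
--     imports = [i.strip() for i in imports_str.split(',')]
--     result = []
--
--     accounts_models = [i for i in imports if i in ['Account']]
--     banking_models = [i for i in imports if i in ['CashAccount', 'CreditAccount', 'Transaction']]
--     transfer_models = [i for i in imports if i in ['Transfer', 'ModelSerializationMixin']]
--
--     if accounts_models:
--         result.append(f"from apps.accounts.models import {', '.join(accounts_models)}")
--     if banking_models: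
--         result.append(f"from apps.banking.models import {', '.join(banking_models)}")
--     if transfer_models:
--         result.append(f"from apps.transfers.models import {', '.join(transfer_models)}")
--
--     return '\n'.join(result) if result else f"from web.models import {imports_str}"
-- ===== SOURCE B (Python) =====
-- MODULE_OF = {
--     'Account': 'apps.accounts.models',
--     'CashAccount': 'apps.banking.models',
--     'CreditAccount': 'apps.banking.models',
--     'Transaction': 'apps.banking.models',
--     'Transfer': 'apps.transfers.models',
--     'ModelSerializationMixin': 'apps.transfers.models',
-- }
-- MODULES = ['apps.accounts.models', 'apps.banking.models', 'apps.transfers.models']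
--
--
-- def convert_multi_model_import(imports_str):
--     """Convert multi-model imports (single pass over the names, grouped by target module)."""
--     pairs = []
--     for part in imports_str.split(','):
--         name = part.strip()
--         module = MODULE_OF.get(name)
--         if module is not None:
--             pairs.append((module, name))
--     groups = {}
--     for module, name in pairs:
--         groups[module] = groups.get(module, []) + [name]
--     lines = [f"from {m} import {', '.join(groups.get(m, []))}"
--              for m in MODULES if groups.get(m, [])]
--     return '\n'.join(lines) if lines else f"from web.models import {imports_str}"
-- ===== Notes on version B (the rewrite author's own statement) =====
-- stated objective: alternative
-- what changed: Replaces A's three separate filter passes over the import list by a single pass that looks each stripped name up in one model-to-module dict and groups it into per-module lists, then emits the lines from the fixed module order.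
import Mathlib
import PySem

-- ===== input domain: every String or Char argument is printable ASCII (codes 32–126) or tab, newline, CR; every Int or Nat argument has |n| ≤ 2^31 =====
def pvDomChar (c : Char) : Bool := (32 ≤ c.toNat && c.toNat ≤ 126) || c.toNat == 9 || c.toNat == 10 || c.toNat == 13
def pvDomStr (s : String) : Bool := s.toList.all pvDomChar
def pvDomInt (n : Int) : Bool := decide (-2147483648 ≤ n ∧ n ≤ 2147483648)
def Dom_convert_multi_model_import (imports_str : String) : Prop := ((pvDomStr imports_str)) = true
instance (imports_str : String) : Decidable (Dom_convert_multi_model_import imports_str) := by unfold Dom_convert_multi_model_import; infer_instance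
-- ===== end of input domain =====

-- B replaces A's three filter passes over the import list by one pass that looks each
-- name up in a model→module dict and groups it; objective: alternative decomposition.

-- ===== PORT A =====
def convert_multi_model_import (imports_str : String) : String :=
  let imports := ((PySem.Str.split? imports_str ",").getD []).map PySem.Str.strip
  let accounts_models := imports.filter (fun i => ["Account"].contains i)
  let banking_models := imports.filter (fun i => ["CashAccount", "CreditAccount", "Transaction"].contains i)
  let transfer_models := imports.filter (fun i => ["Transfer", "ModelSerializationMixin"].contains i)
  let result : List String := []
  let result := if accounts_models.isEmpty then result
    else result ++ ["from apps.accounts.models import " ++ PySem.Str.join ", " accounts_models]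
  let result := if banking_models.isEmpty then result
    else result ++ ["from apps.banking.models import " ++ PySem.Str.join ", " banking_models]
  let result := if transfer_models.isEmpty then result
    else result ++ ["from apps.transfers.models import " ++ PySem.Str.join ", " transfer_models]
  if result.isEmpty then "from web.models import " ++ imports_str
  else PySem.Str.join "\n" result

-- ===== PORT B =====
def pvModuleOf : PySem.Dict String String := PySem.Dict.ofList
  [("Account", "apps.accounts.models"),
   ("CashAccount", "apps.banking.models"),
   ("CreditAccount", "apps.banking.models"),
   ("Transaction", "apps.banking.models"),
   ("Transfer", "apps.transfers.models"),
   ("ModelSerializationMixin", "apps.transfers.models")]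

def pvModules : List String := ["apps.accounts.models", "apps.banking.models", "apps.transfers.models"]

def convert_multi_model_import_alt (imports_str : String) : String :=
  let pairs := ((PySem.Str.split? imports_str ",").getD []).filterMap (fun part =>
    let name := PySem.Str.strip part
    (pvModuleOf.get? name).map (fun m => (m, name)))
  let groups := pairs.foldl (fun d p => d.modify p.1 [] (· ++ [p.2])) PySem.Dict.empty
  let lines := pvModules.filterMap (fun m =>
    let names := groups.getD m []
    if names.isEmpty then none
    else some ("from " ++ m ++ " import " ++ PySem.Str.join ", " names))
  if lines.isEmpty then "from web.models import " ++ imports_str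
  else PySem.Str.join "\n" lines

-- ===== PRECONDITION & SPEC =====
def Spec_convert_multi_model_import (imports_str : String) (out : String) : Prop := out = convert_multi_model_import_alt imports_str
instance (imports_str : String) (out : String) : Decidable (Spec_convert_multi_model_import imports_str out) := by unfold Spec_convert_multi_model_import; infer_instance

-- ===== CLAIM (what is proved, stated in full; the proofs are below) =====
def Claim_equal_convert_multi_model_import : Prop := ∀ (imports_str : String), Dom_convert_multi_model_import imports_str → Spec_convert_multi_model_import imports_str (convert_multi_model_import imports_str)

-- ===== LEMMAS AND PROOFS =====

-- the dict lookup, written as an if-chain on the name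
theorem pvLookup_eq (name : String) : pvModuleOf.get? name =
    if name = "Account" then some "apps.accounts.models"
    else if name = "CashAccount" ∨ name = "CreditAccount" ∨ name = "Transaction" then some "apps.banking.models"
    else if name = "Transfer" ∨ name = "ModelSerializationMixin" then some "apps.transfers.models"
    else none := by
  have hmk : pvModuleOf = PySem.Dict.mk
      [("Account", "apps.accounts.models"),
       ("CashAccount", "apps.banking.models"),
       ("CreditAccount", "apps.banking.models"),
       ("Transaction", "apps.banking.models"),
       ("Transfer", "apps.transfers.models"),
       ("ModelSerializationMixin", "apps.transfers.models")] := by decide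
  rw [hmk]
  simp only [PySem.Dict.get?_mk_cons, beq_iff_eq, eq_comm (b := name)]
  split_ifs <;> simp_all
  simp [PySem.Dict.get?]

theorem pvAccounts_iff (name : String) :
    pvModuleOf.get? name = some "apps.accounts.models" ↔ (["Account"].contains name) = true := by
  rw [pvLookup_eq]; split_ifs <;> simp_all

theorem pvBanking_iff (name : String) :
    pvModuleOf.get? name = some "apps.banking.models" ↔ ((["CashAccount", "CreditAccount", "Transaction"] : List String).contains name) = true := by
  rw [pvLookup_eq]; split_ifs with h1 h2 h3 <;> simp_all

theorem pvTransfers_iff (name : String) :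
    pvModuleOf.get? name = some "apps.transfers.models" ↔ ((["Transfer", "ModelSerializationMixin"] : List String).contains name) = true := by
  rw [pvLookup_eq]; split_ifs with h1 h2 h3 <;> simp_all
  obtain rfl | rfl | rfl := h2 <;> decide

-- per-module grouping: B's filterMap/filter chain equals A's filter over the stripped names
theorem pvGroup_eq (pred : String → Bool) (m : String)
    (h : ∀ name, pvModuleOf.get? name = some m ↔ pred name = true) (parts : List String) :
    ((parts.filterMap (fun part =>
        (pvModuleOf.get? (PySem.Str.strip part)).map (fun mm => (mm, PySem.Str.strip part)))).filter
          (fun p => p.1 == m)).map (·.2)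
      = (parts.map PySem.Str.strip).filter pred := by
  induction parts with
  | nil => simp
  | cons p ps ih =>
    simp only [List.filterMap_cons, List.map_cons, List.filter_cons]
    cases hopt : pvModuleOf.get? (PySem.Str.strip p) with
    | none =>
      have hp : pred (PySem.Str.strip p) = false := by
        by_contra hc
        have := (h (PySem.Str.strip p)).mpr (by simpa using Bool.of_not_eq_false hc)
        simp [hopt] at this
      simp [hp, ih]
    | some mm =>
      by_cases hmm : mm = m
      · subst hmm
        have hp : pred (PySem.Str.strip p) = true := (h _).mp hopt
        simp [hp, ih]
      · have hp : pred (PySem.Str.strip p) = false := by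
          by_contra hc
          have := (h (PySem.Str.strip p)).mpr (by simpa using Bool.of_not_eq_false hc)
          rw [hopt] at this
          exact hmm (by simpa using this)
        have : (mm == m) = false := by simp [hmm]
        simp [hp, this, ih]

-- ===== VERDICT (by name: the statement is the Claim_ definition above) =====
theorem convert_multi_model_import_spec : Claim_equal_convert_multi_model_import := by
  intro s _
  unfold Spec_convert_multi_model_import
  suffices h : ∀ parts : List String,
      (let imports := parts.map PySem.Str.strip
       let accounts_models := imports.filter (fun i => ["Account"].contains i)
       let banking_models := imports.filter (fun i => ["CashAccount", "CreditAccount", "Transaction"].contains i)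
       let transfer_models := imports.filter (fun i => ["Transfer", "ModelSerializationMixin"].contains i)
       let result : List String := []
       let result := if accounts_models.isEmpty then result
         else result ++ ["from apps.accounts.models import " ++ PySem.Str.join ", " accounts_models]
       let result := if banking_models.isEmpty then result
         else result ++ ["from apps.banking.models import " ++ PySem.Str.join ", " banking_models]
       let result := if transfer_models.isEmpty then result
         else result ++ ["from apps.transfers.models import " ++ PySem.Str.join ", " transfer_models]
       if result.isEmpty then "from web.models import " ++ s
       else PySem.Str.join "\n" result)
      = (let pairs := parts.filterMap (fun part =>
           let name := PySem.Str.strip part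
           (pvModuleOf.get? name).map (fun m => (m, name)))
         let groups := pairs.foldl (fun d p => d.modify p.1 [] (· ++ [p.2])) PySem.Dict.empty
         let lines := pvModules.filterMap (fun m =>
           let names := groups.getD m []
           if names.isEmpty then none
           else some ("from " ++ m ++ " import " ++ PySem.Str.join ", " names))
         if lines.isEmpty then "from web.models import " ++ s
         else PySem.Str.join "\n" lines) by
    exact h ((PySem.Str.split? s ",").getD [])
  intro parts
  have hacc := pvGroup_eq (fun i => (["Account"].contains i)) "apps.accounts.models" pvAccounts_iff parts
  have hbank := pvGroup_eq (fun i => ((["CashAccount", "CreditAccount", "Transaction"] : List String).contains i)) "apps.banking.models" pvBanking_iff parts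
  have htrans := pvGroup_eq (fun i => ((["Transfer", "ModelSerializationMixin"] : List String).contains i)) "apps.transfers.models" pvTransfers_iff parts
  have s1 : ("from " ++ "apps.accounts.models" ++ " import " : String) = "from apps.accounts.models import " := by decide
  have s2 : ("from " ++ "apps.banking.models" ++ " import " : String) = "from apps.banking.models import " := by decide
  have s3 : ("from " ++ "apps.transfers.models" ++ " import " : String) = "from apps.transfers.models import " := by decide
  simp only [pvModules, List.filterMap_cons, List.filterMap_nil,
    PySem.Dict.getD_foldl_modify_append, PySem.Dict.getD_empty, List.nil_append,
    hacc, hbank, htrans]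
  cases he1 : ((parts.map PySem.Str.strip).filter (fun i => (["Account"] : List String).contains i)).isEmpty <;>
  cases he2 : ((parts.map PySem.Str.strip).filter (fun i => (["CashAccount", "CreditAccount", "Transaction"] : List String).contains i)).isEmpty <;>
  cases he3 : ((parts.map PySem.Str.strip).filter (fun i => (["Transfer", "ModelSerializationMixin"] : List String).contains i)).isEmpty <;>
  simp only [he1, he2, he3, s1, s2, s3] <;> rfl
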